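-- pv_equiv track=rewrite | github.com/CSKIM999/Algorithm-test | BOJ_/CTstudy/소가 길을 건너간 이유.py | getDistArr
-- ===== SOURCE A (Python) =====
-- def getDistArr(x):
--     distArr = []
--     for i in range(-x,x+1):
--         for j in range(-x,x+1):
--             if x == 2:
--                 if i+j == x and not (i == 0 and j == 0):
--                     distArr.append((i,j,x))
--             else:
--                 if abs(i)+abs(j) == x and not (i == 0 and j == 0):
--                     distArr.append((i,j,x))
--     return distArr
-- ===== SOURCE B (Python) =====
-- def getDistArr(x):
--     # O(x): for each i, emit the (at most two) j with abs(i)+abs(j) == x directly.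
--     distArr = []
--     for i in range(-x, x + 1):
--         r = x - abs(i)
--         if r == 0:
--             if i != 0:
--                 distArr.append((i, 0, x))
--         else:
--             distArr.append((i, -r, x))
--             distArr.append((i, r, x))
--     return distArr
-- ===== Notes on version B (the rewrite author's own statement) =====
-- stated objective: faster
-- what changed: Instead of scanning the whole (2x+1)^2 grid and filtering, B walks i once and emits the at most two j values with abs(i)+abs(j)==x directly, in the same order.
-- intended difference: For x == 2 A's special-cased branch tests i+j == x instead of abs(i)+abs(j) == x and returns only [(0,2,2),(1,1,2),(2,0,2)]; B returns the full Manhattan diamond, which is what the general branch computes for every other x and is the intended enumeration. — e.g. on getDistArr(2): A returns [[0, 2, 2], [1, 1, 2], [2, 0, 2]], B returns [[-2, 0, 2], [-1, -1, 2], [-1, 1, 2], [0, -2, 2], [0, 2, 2], [1, -1, 2], [1, 1, 2], [2, 0, 2]]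
import Mathlib
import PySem

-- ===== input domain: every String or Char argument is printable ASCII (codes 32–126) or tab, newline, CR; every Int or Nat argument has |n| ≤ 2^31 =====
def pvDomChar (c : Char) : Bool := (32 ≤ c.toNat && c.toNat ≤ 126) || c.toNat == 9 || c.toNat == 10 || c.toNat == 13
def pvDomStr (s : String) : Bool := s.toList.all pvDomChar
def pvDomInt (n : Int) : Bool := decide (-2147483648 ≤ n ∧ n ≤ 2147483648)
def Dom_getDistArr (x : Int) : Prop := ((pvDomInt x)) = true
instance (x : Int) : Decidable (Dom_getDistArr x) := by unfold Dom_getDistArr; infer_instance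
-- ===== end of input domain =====

-- B replaces A's O(x^2) scan of the whole grid by an O(x) walk that emits, for each i,
-- the at most two j with |i|+|j| = x directly, in the same order.

-- ===== PORT A =====
def getDistArr (x : Int) : List (List Int) :=
  (PySem.List.pyRange (-x) (x+1) 1).foldl (fun distArr i =>
    (PySem.List.pyRange (-x) (x+1) 1).foldl (fun distArr j =>
      if x == 2 then
        if (i + j == x) && !((i == 0) && (j == 0)) then distArr ++ [[i, j, x]] else distArr
      else
        if ((i.natAbs : Int) + (j.natAbs : Int) == x) && !((i == 0) && (j == 0)) then
          distArr ++ [[i, j, x]]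
        else distArr) distArr) []

-- ===== PORT B =====
def getDistArr_alt (x : Int) : List (List Int) :=
  (PySem.List.pyRange (-x) (x+1) 1).foldl (fun distArr i =>
    let r := x - (i.natAbs : Int)
    if r == 0 then
      if i != 0 then distArr ++ [[i, 0, x]] else distArr
    else
      distArr ++ [[i, -r, x]] ++ [[i, r, x]]) []

-- ===== PRECONDITION & SPEC =====
-- For x == 2 A's special-cased branch tests i+j == x instead of abs(i)+abs(j) == x and returns
-- only [[0,2,2],[1,1,2],[2,0,2]]; B returns the full Manhattan diamond, which is what the
-- general branch computes for every other x and is the intended enumeration.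
def D_getDistArr (x : Int) : Prop := x = 2
instance (x : Int) : Decidable (D_getDistArr x) := by unfold D_getDistArr; infer_instance
def Spec_getDistArr (x : Int) (out : List (List Int)) : Prop := ¬ D_getDistArr x → out = getDistArr_alt x
instance (x : Int) (out : List (List Int)) : Decidable (Spec_getDistArr x out) := by unfold Spec_getDistArr; infer_instance
def pvDiffWitness_getDistArr : Int := 2
def pvDiffWitnessOut_getDistArr : (List (List Int)) × (List (List Int)) :=
  ([[0, 2, 2], [1, 1, 2], [2, 0, 2]],
   [[-2, 0, 2], [-1, -1, 2], [-1, 1, 2], [0, -2, 2], [0, 2, 2], [1, -1, 2], [1, 1, 2], [2, 0, 2]])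

-- ===== CLAIM (what is proved, stated in full; the proofs are below) =====
def Claim_unchanged_getDistArr : Prop := ∀ (x : Int), Dom_getDistArr x → Spec_getDistArr x (getDistArr x)
def Claim_changed_getDistArr : Prop := Dom_getDistArr (pvDiffWitness_getDistArr) ∧ D_getDistArr (pvDiffWitness_getDistArr) ∧ getDistArr (pvDiffWitness_getDistArr) = pvDiffWitnessOut_getDistArr.1 ∧ getDistArr_alt (pvDiffWitness_getDistArr) = pvDiffWitnessOut_getDistArr.2 ∧ pvDiffWitnessOut_getDistArr.1 ≠ pvDiffWitnessOut_getDistArr.2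
def Claim_exact_getDistArr : Prop := ∀ (x : Int), Dom_getDistArr x → D_getDistArr x → getDistArr x ≠ getDistArr_alt x

-- ===== LEMMAS AND PROOFS =====

-- B's per-i contribution, as a list.
def altPiece (x i : Int) : List (List Int) :=
  let r := x - (i.natAbs : Int)
  if r == 0 then (if i != 0 then [[i, 0, x]] else []) else [[i, -r, x], [i, r, x]]

lemma altPiece_r0 (x i : Int) (hr : x - (i.natAbs : Int) = 0) (hi0 : i ≠ 0) :
    altPiece x i = [[i, 0, x]] := by
  unfold altPiece
  rw [hr]
  simp [hi0]

lemma altPiece_rpos (x i : Int) (hr : x - (i.natAbs : Int) ≠ 0) :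
    altPiece x i = [[i, -(x - (i.natAbs : Int)), x], [i, x - (i.natAbs : Int), x]] := by
  unfold altPiece
  have h1 : (x - (i.natAbs : Int) == 0) = false := by simpa using hr
  simp only [h1, Bool.false_eq_true, if_false]

-- A's inner filter over the full range equals B's direct piece, for i in the range.
lemma filter_inner (x i : Int) (hi : -x ≤ i) (hi2 : i < x + 1) :
    ((PySem.List.pyRange (-x) (x+1) 1).filter
      (fun j => ((i.natAbs : Int) + (j.natAbs : Int) == x) && !((i == 0) && (j == 0)))).map
      (fun j => [i, j, x]) = altPiece x i := by
  have habs : (i.natAbs : Int) ≤ x := by omega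
  by_cases hr : x - (i.natAbs : Int) = 0
  · by_cases hi0 : i = 0
    · -- then x = 0: everything is concrete
      subst hi0
      have hx0 : x = 0 := by omega
      subst hx0
      decide
    · -- |i| = x : only j = 0 qualifies
      have hsplit : PySem.List.pyRange (-x) (x+1) 1 =
          PySem.List.pyRange (-x) 0 1 ++ PySem.List.pyRange 0 (x+1) 1 :=
        PySem.List.pyRange_one_append _ _ _ (by omega) (by omega)
      have hcons : PySem.List.pyRange 0 (x+1) 1 = 0 :: PySem.List.pyRange 1 (x+1) 1 :=
        PySem.List.pyRange_one_cons (by omega)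
      have h1 : (PySem.List.pyRange (-x) 0 1).filter
          (fun j => ((i.natAbs : Int) + (j.natAbs : Int) == x) && !((i == 0) && (j == 0))) = [] := by
        rw [List.filter_eq_nil_iff]
        intro j hj
        rw [PySem.List.mem_pyRange_one] at hj
        simp only [Bool.and_eq_true, beq_iff_eq, Bool.not_eq_eq_eq_not, Bool.not_true,
          Bool.and_eq_false_iff, not_and]
        omega
      have h2 : (PySem.List.pyRange 1 (x+1) 1).filter
          (fun j => ((i.natAbs : Int) + (j.natAbs : Int) == x) && !((i == 0) && (j == 0))) = [] := by
        rw [List.filter_eq_nil_iff]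
        intro j hj
        rw [PySem.List.mem_pyRange_one] at hj
        simp only [Bool.and_eq_true, beq_iff_eq, Bool.not_eq_eq_eq_not, Bool.not_true,
          Bool.and_eq_false_iff, not_and]
        omega
      have hp0 : (((i.natAbs : Int) + ((0:Int).natAbs : Int) == x) && !((i == 0) && ((0:Int) == 0))) = true := by
        simp only [Bool.and_eq_true, beq_iff_eq, Bool.not_eq_eq_eq_not, Bool.not_true,
          Bool.and_eq_false_iff]
        refine ⟨by omega, Or.inl (by simpa using hi0)⟩
      rw [hsplit, hcons, List.filter_append, List.filter_cons, h1, h2, hp0,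
        altPiece_r0 x i hr hi0]
      simp
  · -- 0 < x - |i| : exactly j = -(x-|i|) and j = x-|i| qualify
    have hrpos : 0 < x - (i.natAbs : Int) := by omega
    set r : Int := x - (i.natAbs : Int) with hrdef
    have e1 : PySem.List.pyRange (-x) (x+1) 1 =
        PySem.List.pyRange (-x) (-r) 1 ++ PySem.List.pyRange (-r) (x+1) 1 :=
      PySem.List.pyRange_one_append _ _ _ (by omega) (by omega)
    have e2 : PySem.List.pyRange (-r) (x+1) 1 = -r :: PySem.List.pyRange (-r+1) (x+1) 1 :=
      PySem.List.pyRange_one_cons (by omega)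
    have e3 : PySem.List.pyRange (-r+1) (x+1) 1 =
        PySem.List.pyRange (-r+1) r 1 ++ PySem.List.pyRange r (x+1) 1 :=
      PySem.List.pyRange_one_append _ _ _ (by omega) (by omega)
    have e4 : PySem.List.pyRange r (x+1) 1 = r :: PySem.List.pyRange (r+1) (x+1) 1 :=
      PySem.List.pyRange_one_cons (by omega)
    have hnil : ∀ a b : Int,
        (∀ j, a ≤ j → j < b → ¬ ((i.natAbs : Int) + (j.natAbs : Int) = x ∧ ¬ (i = 0 ∧ j = 0))) →
        (PySem.List.pyRange a b 1).filter
          (fun j => ((i.natAbs : Int) + (j.natAbs : Int) == x) && !((i == 0) && (j == 0))) = [] := by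
      intro a b h
      rw [List.filter_eq_nil_iff]
      intro j hj
      rw [PySem.List.mem_pyRange_one] at hj
      have := h j hj.1 hj.2
      simp only [Bool.and_eq_true, beq_iff_eq, Bool.not_eq_eq_eq_not, Bool.not_true,
        Bool.and_eq_false_iff, not_and]
      by_cases h0 : i = 0 <;> by_cases j0 : j = 0 <;> simp_all <;> omega
    have h1 := hnil (-x) (-r) (by intro j hj1 hj2; omega)
    have h2 := hnil (-r+1) r (by intro j hj1 hj2; omega)
    have h3 := hnil (r+1) (x+1) (by intro j hj1 hj2; omega)
    have hpneg : (((i.natAbs : Int) + ((-r).natAbs : Int) == x) && !((i == 0) && ((-r) == 0))) = true := by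
      simp only [Bool.and_eq_true, beq_iff_eq, Bool.not_eq_eq_eq_not, Bool.not_true,
        Bool.and_eq_false_iff]
      refine ⟨by omega, Or.inr ?_⟩
      simp only [beq_eq_false_iff_ne, ne_eq]
      omega
    have hppos : (((i.natAbs : Int) + (r.natAbs : Int) == x) && !((i == 0) && (r == 0))) = true := by
      simp only [Bool.and_eq_true, beq_iff_eq, Bool.not_eq_eq_eq_not, Bool.not_true,
        Bool.and_eq_false_iff]
      refine ⟨by omega, Or.inr ?_⟩
      simp only [beq_eq_false_iff_ne, ne_eq]
      omega
    rw [e1, e2, e3, e4, List.filter_append, List.filter_cons, List.filter_append,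
      List.filter_cons, h1, h2, h3, hpneg, hppos, altPiece_rpos x i hr]
    simp
    rw [Int.abs_eq_natAbs]
    omega

lemma getDistArr_eq_flatMap (x : Int) (hx : x ≠ 2) :
    getDistArr x = (PySem.List.pyRange (-x) (x+1) 1).flatMap (altPiece x) := by
  unfold getDistArr
  have hx' : (x == 2) = false := by simpa using hx
  have hflat := PySem.List.foldl_append_eq_flatMap (altPiece x)
    (PySem.List.pyRange (-x) (x+1) 1) ([] : List (List Int))
  refine Eq.trans
    (PySem.List.foldl_congr_mem _ _ (fun distArr i => distArr ++ altPiece x i) _ ?_)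
    (by simpa using hflat)
  intro acc i hi
  rw [PySem.List.mem_pyRange_one] at hi
  simp only [hx', Bool.false_eq_true, if_false]
  rw [PySem.List.foldl_append_if
      (fun j => ((i.natAbs : Int) + (j.natAbs : Int) == x) && !((i == 0) && (j == 0)))
      (fun j => [i, j, x]), filter_inner x i hi.1 hi.2]

lemma getDistArr_alt_eq_flatMap (x : Int) :
    getDistArr_alt x = (PySem.List.pyRange (-x) (x+1) 1).flatMap (altPiece x) := by
  unfold getDistArr_alt
  have hflat := PySem.List.foldl_append_eq_flatMap (altPiece x)
    (PySem.List.pyRange (-x) (x+1) 1) ([] : List (List Int))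
  refine Eq.trans
    (PySem.List.foldl_congr_mem _ _ (fun distArr i => distArr ++ altPiece x i) _ ?_)
    (by simpa using hflat)
  intro acc i _
  dsimp only
  by_cases hr : x - (i.natAbs : Int) = 0
  · have h1 : (x - (i.natAbs : Int) == 0) = true := by simpa using hr
    by_cases hi0 : i = 0
    · have hx0 : x = 0 := by omega
      subst hi0; subst hx0
      simp [altPiece]
    · have h2 : (i != 0) = true := by simpa using hi0
      rw [if_pos h1, if_pos h2, altPiece_r0 x i hr hi0]
  · have h1 : ¬ ((x - (i.natAbs : Int) == 0) = true) := by simpa using hr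
    rw [if_neg h1, altPiece_rpos x i hr]
    simp

-- ===== VERDICT (by name: the statement is the Claim_ definition above) =====
theorem getDistArr_spec : Claim_unchanged_getDistArr := by
  intro x _ hD
  rw [getDistArr_eq_flatMap x hD, getDistArr_alt_eq_flatMap x]

theorem getDistArr_changed : Claim_changed_getDistArr := by
  unfold Claim_changed_getDistArr; decide

theorem getDistArr_tight : Claim_exact_getDistArr := by
  intro x _ hD
  subst hD
  decide
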